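-- pv_equiv track=rewrite | github.com/pypi-data/pypi-mirror-357 | packages/mandsot/mandsot-0.0.2.tar.gz/mandsot-0.0.2/mandsot/dataloader/__init__.py | get_mand_initial_coding
-- ===== SOURCE A (Python) =====
-- def get_mand_initial_coding(input_str):
--     code_mapping = {
--         'b': 1,
--         'p': 2,
--         'm': 3,
--         'f': 4,
--         'd': 5,
--         't': 6,
--         'n': 7,
--         'l': 8,
--         'g': 9,
--         'k': 10,
--         'h': 11,
--         'j': 12,
--         'q': 13,
--         'x': 14,
--         'zh': 15,
--         'ch': 16,
--         'sh': 17,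
--         'r': 18,
--         'z': 19,
--         'c': 20,
--         's': 21,
--         'a': 22,
--         'o': 23,
--         'e': 24,
--         'yuan': 25,
--         'yue': 26,
--         'yun': 27,
--         'yu': 28,
--         'y': 29,
--         'w': 30
--     }
--     for key in code_mapping:
--         if input_str.lower().startswith(key):
--             return code_mapping[key]
--     return 0
-- ===== SOURCE B (Python) =====
-- def get_mand_initial_coding(input_str):
--     s = input_str.lower()
--     if not s:
--         return 0
--     c = s[0]
--     if c == 'y':
--         t = s[1:]
--         if t.startswith('uan'):
--             return 25
--         if t.startswith('ue'):
--             return 26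
--         if t.startswith('un'):
--             return 27
--         if t.startswith('u'):
--             return 28
--         return 29
--     if s[1:2] == 'h':
--         if c == 'z':
--             return 15
--         if c == 'c':
--             return 16
--         if c == 's':
--             return 17
--     i = 'bpmfdtnlgkhjqx'.find(c)
--     if i != -1:
--         return i + 1
--     j = 'rzcsaoe'.find(c)
--     if j != -1:
--         return j + 18
--     if c == 'w':
--         return 30
--     return 0
-- ===== Notes on version B (the rewrite author's own statement) =====
-- stated objective: faster
-- what changed: A scans all 30 dict keys in order, re-lowercasing the whole input with startswith on each; B lowercases once and dispatches on the first character with a decision tree (the 'y...' family, the zh/ch/sh digraphs, then positional lookup of single letters in two short strings), with no dict and no key scan.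
import Mathlib
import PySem

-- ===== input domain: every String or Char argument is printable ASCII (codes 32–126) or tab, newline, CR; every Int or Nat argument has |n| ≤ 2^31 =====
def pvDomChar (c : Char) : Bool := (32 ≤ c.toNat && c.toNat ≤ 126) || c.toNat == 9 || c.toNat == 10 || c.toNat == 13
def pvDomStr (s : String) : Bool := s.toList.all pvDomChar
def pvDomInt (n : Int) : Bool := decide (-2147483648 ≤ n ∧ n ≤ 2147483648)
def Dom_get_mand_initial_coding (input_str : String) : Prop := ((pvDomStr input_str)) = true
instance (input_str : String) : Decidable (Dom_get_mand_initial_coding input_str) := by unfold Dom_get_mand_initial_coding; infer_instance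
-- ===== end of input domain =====

-- B replaces A's ordered scan of all 30 dict keys with startswith (A re-lowercases the input on
-- every iteration) by a decision tree on the first character: lowercase once, handle the 'y…' and
-- 'zh/ch/sh' digraph families explicitly, and look the remaining single letters up by position in
-- two small strings. Objective: simpler/faster dispatch, no dict and no 30-key scan.

-- ===== PORT A =====
def pvCodeMappingA : PySem.Dict String Int := PySem.Dict.ofList [("b", 1), ("p", 2), ("m", 3), ("f", 4), ("d", 5), ("t", 6), ("n", 7), ("l", 8), ("g", 9), ("k", 10), ("h", 11), ("j", 12), ("q", 13), ("x", 14), ("zh", 15), ("ch", 16), ("sh", 17), ("r", 18), ("z", 19), ("c", 20), ("s", 21), ("a", 22), ("o", 23), ("e", 24), ("yuan", 25), ("yue", 26), ("yun", 27), ("yu", 28), ("y", 29), ("w", 30)]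
-- 'for key in code_mapping: if input_str.lower().startswith(key): return code_mapping[key]'
def pvLoopA (input_str : String) : List String → Int
  | [] => 0
  | key :: rest =>
    if PySem.Str.startswith (PySem.Str.lower input_str) key
    then PySem.Dict.getD pvCodeMappingA key 0
    else pvLoopA input_str rest
def get_mand_initial_coding (input_str : String) : Int :=
  pvLoopA input_str (PySem.Dict.keys pvCodeMappingA)

-- ===== PORT B =====
-- core of B on the lowered string as its character list: 'if not s: return 0; c = s[0]; …'
-- ('.startswith' = PySem.Chars.startswith; s[1:2] == 'h' = t.take 1 = ['h'];
--  "….find(c)' for the single character c = List.idxOf? c on the string's characters, exact here)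
def pvAltCore : List Char → Int
  | [] => 0
  | c :: t =>
    if c = 'y' then
      if PySem.Chars.startswith t ['u', 'a', 'n'] then 25
      else if PySem.Chars.startswith t ['u', 'e'] then 26
      else if PySem.Chars.startswith t ['u', 'n'] then 27
      else if PySem.Chars.startswith t ['u'] then 28
      else 29
    else if t.take 1 = ['h'] ∧ c = 'z' then 15
    else if t.take 1 = ['h'] ∧ c = 'c' then 16
    else if t.take 1 = ['h'] ∧ c = 's' then 17
    else
      match List.idxOf? c ['b', 'p', 'm', 'f', 'd', 't', 'n', 'l', 'g', 'k', 'h', 'j', 'q', 'x'] with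
      | some i => (i : Int) + 1
      | none =>
        match List.idxOf? c ['r', 'z', 'c', 's', 'a', 'o', 'e'] with
        | some j => (j : Int) + 18
        | none => if c = 'w' then 30 else 0
def get_mand_initial_coding_alt (input_str : String) : Int :=
  pvAltCore (PySem.Str.lower input_str).toList

-- ===== PRECONDITION & SPEC =====
def Spec_get_mand_initial_coding (input_str : String) (out : Int) : Prop := out = get_mand_initial_coding_alt input_str
instance (input_str : String) (out : Int) : Decidable (Spec_get_mand_initial_coding input_str out) := by unfold Spec_get_mand_initial_coding; infer_instance

-- ===== CLAIM (what is proved, stated in full; the proofs are below) =====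
def Claim_equal_get_mand_initial_coding : Prop := ∀ (input_str : String), Dom_get_mand_initial_coding input_str → Spec_get_mand_initial_coding input_str (get_mand_initial_coding input_str)

-- ===== LEMMAS AND PROOFS =====

def pvPairs : List (List Char × Int) := [(['b'], 1), (['p'], 2), (['m'], 3), (['f'], 4), (['d'], 5), (['t'], 6), (['n'], 7), (['l'], 8), (['g'], 9), (['k'], 10), (['h'], 11), (['j'], 12), (['q'], 13), (['x'], 14), (['z', 'h'], 15), (['c', 'h'], 16), (['s', 'h'], 17), (['r'], 18), (['z'], 19), (['c'], 20), (['s'], 21), (['a'], 22), (['o'], 23), (['e'], 24), (['y', 'u', 'a', 'n'], 25), (['y', 'u', 'e'], 26), (['y', 'u', 'n'], 27), (['y', 'u'], 28), (['y'], 29), (['w'], 30)]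
def pvFindA (l : List Char) : List (List Char × Int) → Int
  | [] => 0
  | (k, v) :: rest => if k.isPrefixOf l then v else pvFindA l rest

theorem bridgeA (s : String) :
    get_mand_initial_coding s = pvFindA (PySem.Chars.lower s.toList) pvPairs := by
  have hkeys : PySem.Dict.keys pvCodeMappingA = ["b","p","m","f","d","t","n","l","g","k","h","j","q","x","zh","ch","sh","r","z","c","s","a","o","e","yuan","yue","yun","yu","y","w"] := by rfl
  have hg1 : PySem.Dict.getD pvCodeMappingA "b" 0 = 1 := by rfl
  have hg2 : PySem.Dict.getD pvCodeMappingA "p" 0 = 2 := by rfl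
  have hg3 : PySem.Dict.getD pvCodeMappingA "m" 0 = 3 := by rfl
  have hg4 : PySem.Dict.getD pvCodeMappingA "f" 0 = 4 := by rfl
  have hg5 : PySem.Dict.getD pvCodeMappingA "d" 0 = 5 := by rfl
  have hg6 : PySem.Dict.getD pvCodeMappingA "t" 0 = 6 := by rfl
  have hg7 : PySem.Dict.getD pvCodeMappingA "n" 0 = 7 := by rfl
  have hg8 : PySem.Dict.getD pvCodeMappingA "l" 0 = 8 := by rfl
  have hg9 : PySem.Dict.getD pvCodeMappingA "g" 0 = 9 := by rfl
  have hg10 : PySem.Dict.getD pvCodeMappingA "k" 0 = 10 := by rfl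
  have hg11 : PySem.Dict.getD pvCodeMappingA "h" 0 = 11 := by rfl
  have hg12 : PySem.Dict.getD pvCodeMappingA "j" 0 = 12 := by rfl
  have hg13 : PySem.Dict.getD pvCodeMappingA "q" 0 = 13 := by rfl
  have hg14 : PySem.Dict.getD pvCodeMappingA "x" 0 = 14 := by rfl
  have hg15 : PySem.Dict.getD pvCodeMappingA "zh" 0 = 15 := by rfl
  have hg16 : PySem.Dict.getD pvCodeMappingA "ch" 0 = 16 := by rfl
  have hg17 : PySem.Dict.getD pvCodeMappingA "sh" 0 = 17 := by rfl
  have hg18 : PySem.Dict.getD pvCodeMappingA "r" 0 = 18 := by rfl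
  have hg19 : PySem.Dict.getD pvCodeMappingA "z" 0 = 19 := by rfl
  have hg20 : PySem.Dict.getD pvCodeMappingA "c" 0 = 20 := by rfl
  have hg21 : PySem.Dict.getD pvCodeMappingA "s" 0 = 21 := by rfl
  have hg22 : PySem.Dict.getD pvCodeMappingA "a" 0 = 22 := by rfl
  have hg23 : PySem.Dict.getD pvCodeMappingA "o" 0 = 23 := by rfl
  have hg24 : PySem.Dict.getD pvCodeMappingA "e" 0 = 24 := by rfl
  have hg25 : PySem.Dict.getD pvCodeMappingA "yuan" 0 = 25 := by rfl
  have hg26 : PySem.Dict.getD pvCodeMappingA "yue" 0 = 26 := by rfl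
  have hg27 : PySem.Dict.getD pvCodeMappingA "yun" 0 = 27 := by rfl
  have hg28 : PySem.Dict.getD pvCodeMappingA "yu" 0 = 28 := by rfl
  have hg29 : PySem.Dict.getD pvCodeMappingA "y" 0 = 29 := by rfl
  have hg30 : PySem.Dict.getD pvCodeMappingA "w" 0 = 30 := by rfl
  show pvLoopA s (PySem.Dict.keys pvCodeMappingA) = _
  rw [hkeys]
  simp [pvLoopA, pvFindA, pvPairs, PySem.Str.startswith, PySem.Chars.startswith, hg1, hg2, hg3, hg4, hg5, hg6, hg7, hg8, hg9, hg10, hg11, hg12, hg13, hg14, hg15, hg16, hg17, hg18, hg19, hg20, hg21, hg22, hg23, hg24, hg25, hg26, hg27, hg28, hg29, hg30]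

theorem bridgeB (s : String) :
    get_mand_initial_coding_alt s = pvAltCore (PySem.Chars.lower s.toList) := by
  simp [get_mand_initial_coding_alt]

theorem pvTake1 (t : List Char) : (['h'] <+: t) ↔ t.take 1 = ['h'] := by
  cases t with
  | nil => simp
  | cons a r => simp [List.cons_prefix_cons]; exact eq_comm

set_option maxHeartbeats 4000000 in
theorem pvMain (l : List Char) : pvFindA l pvPairs = pvAltCore l := by
  match l with
  | [] => decide
  | c :: t =>
    by_cases h_b : 'b' = c
    · subst h_b
      simp [pvFindA, pvAltCore, pvPairs, List.isPrefixOf_iff_prefix, List.cons_prefix_cons, PySem.Chars.startswith_iff, pvTake1, List.idxOf?, List.findIdx?, List.findIdx?.go]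
    by_cases h_p : 'p' = c
    · subst h_p
      simp [pvFindA, pvAltCore, pvPairs, List.isPrefixOf_iff_prefix, List.cons_prefix_cons, PySem.Chars.startswith_iff, pvTake1, List.idxOf?, List.findIdx?, List.findIdx?.go, h_b]
    by_cases h_m : 'm' = c
    · subst h_m
      simp [pvFindA, pvAltCore, pvPairs, List.isPrefixOf_iff_prefix, List.cons_prefix_cons, PySem.Chars.startswith_iff, pvTake1, List.idxOf?, List.findIdx?, List.findIdx?.go, h_b, h_p]
    by_cases h_f : 'f' = c
    · subst h_f
      simp [pvFindA, pvAltCore, pvPairs, List.isPrefixOf_iff_prefix, List.cons_prefix_cons, PySem.Chars.startswith_iff, pvTake1, List.idxOf?, List.findIdx?, List.findIdx?.go, h_b, h_p, h_m]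
    by_cases h_d : 'd' = c
    · subst h_d
      simp [pvFindA, pvAltCore, pvPairs, List.isPrefixOf_iff_prefix, List.cons_prefix_cons, PySem.Chars.startswith_iff, pvTake1, List.idxOf?, List.findIdx?, List.findIdx?.go, h_b, h_p, h_m, h_f]
    by_cases h_t : 't' = c
    · subst h_t
      simp [pvFindA, pvAltCore, pvPairs, List.isPrefixOf_iff_prefix, List.cons_prefix_cons, PySem.Chars.startswith_iff, pvTake1, List.idxOf?, List.findIdx?, List.findIdx?.go, h_b, h_p, h_m, h_f, h_d]
    by_cases h_n : 'n' = c
    · subst h_n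
      simp [pvFindA, pvAltCore, pvPairs, List.isPrefixOf_iff_prefix, List.cons_prefix_cons, PySem.Chars.startswith_iff, pvTake1, List.idxOf?, List.findIdx?, List.findIdx?.go, h_b, h_p, h_m, h_f, h_d, h_t]
    by_cases h_l : 'l' = c
    · subst h_l
      simp [pvFindA, pvAltCore, pvPairs, List.isPrefixOf_iff_prefix, List.cons_prefix_cons, PySem.Chars.startswith_iff, pvTake1, List.idxOf?, List.findIdx?, List.findIdx?.go, h_b, h_p, h_m, h_f, h_d, h_t, h_n]
    by_cases h_g : 'g' = c
    · subst h_g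
      simp [pvFindA, pvAltCore, pvPairs, List.isPrefixOf_iff_prefix, List.cons_prefix_cons, PySem.Chars.startswith_iff, pvTake1, List.idxOf?, List.findIdx?, List.findIdx?.go, h_b, h_p, h_m, h_f, h_d, h_t, h_n, h_l]
    by_cases h_k : 'k' = c
    · subst h_k
      simp [pvFindA, pvAltCore, pvPairs, List.isPrefixOf_iff_prefix, List.cons_prefix_cons, PySem.Chars.startswith_iff, pvTake1, List.idxOf?, List.findIdx?, List.findIdx?.go, h_b, h_p, h_m, h_f, h_d, h_t, h_n, h_l, h_g]
    by_cases h_h : 'h' = c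
    · subst h_h
      simp [pvFindA, pvAltCore, pvPairs, List.isPrefixOf_iff_prefix, List.cons_prefix_cons, PySem.Chars.startswith_iff, pvTake1, List.idxOf?, List.findIdx?, List.findIdx?.go, h_b, h_p, h_m, h_f, h_d, h_t, h_n, h_l, h_g, h_k]
    by_cases h_j : 'j' = c
    · subst h_j
      simp [pvFindA, pvAltCore, pvPairs, List.isPrefixOf_iff_prefix, List.cons_prefix_cons, PySem.Chars.startswith_iff, pvTake1, List.idxOf?, List.findIdx?, List.findIdx?.go, h_b, h_p, h_m, h_f, h_d, h_t, h_n, h_l, h_g, h_k, h_h]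
    by_cases h_q : 'q' = c
    · subst h_q
      simp [pvFindA, pvAltCore, pvPairs, List.isPrefixOf_iff_prefix, List.cons_prefix_cons, PySem.Chars.startswith_iff, pvTake1, List.idxOf?, List.findIdx?, List.findIdx?.go, h_b, h_p, h_m, h_f, h_d, h_t, h_n, h_l, h_g, h_k, h_h, h_j]
    by_cases h_x : 'x' = c
    · subst h_x
      simp [pvFindA, pvAltCore, pvPairs, List.isPrefixOf_iff_prefix, List.cons_prefix_cons, PySem.Chars.startswith_iff, pvTake1, List.idxOf?, List.findIdx?, List.findIdx?.go, h_b, h_p, h_m, h_f, h_d, h_t, h_n, h_l, h_g, h_k, h_h, h_j, h_q]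
    by_cases h_z : 'z' = c
    · subst h_z
      by_cases hh : t.take 1 = ['h']
      · simp [pvFindA, pvAltCore, pvPairs, List.isPrefixOf_iff_prefix, List.cons_prefix_cons, PySem.Chars.startswith_iff, pvTake1, List.idxOf?, List.findIdx?, List.findIdx?.go, h_b, h_p, h_m, h_f, h_d, h_t, h_n, h_l, h_g, h_k, h_h, h_j, h_q, h_x, hh]
      · simp [pvFindA, pvAltCore, pvPairs, List.isPrefixOf_iff_prefix, List.cons_prefix_cons, PySem.Chars.startswith_iff, pvTake1, List.idxOf?, List.findIdx?, List.findIdx?.go, h_b, h_p, h_m, h_f, h_d, h_t, h_n, h_l, h_g, h_k, h_h, h_j, h_q, h_x, hh]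
    by_cases h_c : 'c' = c
    · subst h_c
      by_cases hh : t.take 1 = ['h']
      · simp [pvFindA, pvAltCore, pvPairs, List.isPrefixOf_iff_prefix, List.cons_prefix_cons, PySem.Chars.startswith_iff, pvTake1, List.idxOf?, List.findIdx?, List.findIdx?.go, h_b, h_p, h_m, h_f, h_d, h_t, h_n, h_l, h_g, h_k, h_h, h_j, h_q, h_x, h_z, hh]
      · simp [pvFindA, pvAltCore, pvPairs, List.isPrefixOf_iff_prefix, List.cons_prefix_cons, PySem.Chars.startswith_iff, pvTake1, List.idxOf?, List.findIdx?, List.findIdx?.go, h_b, h_p, h_m, h_f, h_d, h_t, h_n, h_l, h_g, h_k, h_h, h_j, h_q, h_x, h_z, hh]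
    by_cases h_s : 's' = c
    · subst h_s
      by_cases hh : t.take 1 = ['h']
      · simp [pvFindA, pvAltCore, pvPairs, List.isPrefixOf_iff_prefix, List.cons_prefix_cons, PySem.Chars.startswith_iff, pvTake1, List.idxOf?, List.findIdx?, List.findIdx?.go, h_b, h_p, h_m, h_f, h_d, h_t, h_n, h_l, h_g, h_k, h_h, h_j, h_q, h_x, h_z, h_c, hh]
      · simp [pvFindA, pvAltCore, pvPairs, List.isPrefixOf_iff_prefix, List.cons_prefix_cons, PySem.Chars.startswith_iff, pvTake1, List.idxOf?, List.findIdx?, List.findIdx?.go, h_b, h_p, h_m, h_f, h_d, h_t, h_n, h_l, h_g, h_k, h_h, h_j, h_q, h_x, h_z, h_c, hh]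
    by_cases h_r : 'r' = c
    · subst h_r
      simp [pvFindA, pvAltCore, pvPairs, List.isPrefixOf_iff_prefix, List.cons_prefix_cons, PySem.Chars.startswith_iff, pvTake1, List.idxOf?, List.findIdx?, List.findIdx?.go, h_b, h_p, h_m, h_f, h_d, h_t, h_n, h_l, h_g, h_k, h_h, h_j, h_q, h_x, h_z, h_c, h_s]
    by_cases h_a : 'a' = c
    · subst h_a
      simp [pvFindA, pvAltCore, pvPairs, List.isPrefixOf_iff_prefix, List.cons_prefix_cons, PySem.Chars.startswith_iff, pvTake1, List.idxOf?, List.findIdx?, List.findIdx?.go, h_b, h_p, h_m, h_f, h_d, h_t, h_n, h_l, h_g, h_k, h_h, h_j, h_q, h_x, h_z, h_c, h_s, h_r]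
    by_cases h_o : 'o' = c
    · subst h_o
      simp [pvFindA, pvAltCore, pvPairs, List.isPrefixOf_iff_prefix, List.cons_prefix_cons, PySem.Chars.startswith_iff, pvTake1, List.idxOf?, List.findIdx?, List.findIdx?.go, h_b, h_p, h_m, h_f, h_d, h_t, h_n, h_l, h_g, h_k, h_h, h_j, h_q, h_x, h_z, h_c, h_s, h_r, h_a]
    by_cases h_e : 'e' = c
    · subst h_e
      simp [pvFindA, pvAltCore, pvPairs, List.isPrefixOf_iff_prefix, List.cons_prefix_cons, PySem.Chars.startswith_iff, pvTake1, List.idxOf?, List.findIdx?, List.findIdx?.go, h_b, h_p, h_m, h_f, h_d, h_t, h_n, h_l, h_g, h_k, h_h, h_j, h_q, h_x, h_z, h_c, h_s, h_r, h_a, h_o]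
    by_cases h_y : 'y' = c
    · subst h_y
      by_cases h1 : ['u', 'a', 'n'] <+: t
      · simp [pvFindA, pvAltCore, pvPairs, List.isPrefixOf_iff_prefix, List.cons_prefix_cons, PySem.Chars.startswith_iff, pvTake1, List.idxOf?, List.findIdx?, List.findIdx?.go, h_b, h_p, h_m, h_f, h_d, h_t, h_n, h_l, h_g, h_k, h_h, h_j, h_q, h_x, h_z, h_c, h_s, h_r, h_a, h_o, h_e, h1]
      by_cases h2 : ['u', 'e'] <+: t
      · simp [pvFindA, pvAltCore, pvPairs, List.isPrefixOf_iff_prefix, List.cons_prefix_cons, PySem.Chars.startswith_iff, pvTake1, List.idxOf?, List.findIdx?, List.findIdx?.go, h_b, h_p, h_m, h_f, h_d, h_t, h_n, h_l, h_g, h_k, h_h, h_j, h_q, h_x, h_z, h_c, h_s, h_r, h_a, h_o, h_e, h1, h2]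
      by_cases h3 : ['u', 'n'] <+: t
      · simp [pvFindA, pvAltCore, pvPairs, List.isPrefixOf_iff_prefix, List.cons_prefix_cons, PySem.Chars.startswith_iff, pvTake1, List.idxOf?, List.findIdx?, List.findIdx?.go, h_b, h_p, h_m, h_f, h_d, h_t, h_n, h_l, h_g, h_k, h_h, h_j, h_q, h_x, h_z, h_c, h_s, h_r, h_a, h_o, h_e, h1, h2, h3]
      by_cases h4 : ['u'] <+: t
      · simp [pvFindA, pvAltCore, pvPairs, List.isPrefixOf_iff_prefix, List.cons_prefix_cons, PySem.Chars.startswith_iff, pvTake1, List.idxOf?, List.findIdx?, List.findIdx?.go, h_b, h_p, h_m, h_f, h_d, h_t, h_n, h_l, h_g, h_k, h_h, h_j, h_q, h_x, h_z, h_c, h_s, h_r, h_a, h_o, h_e, h1, h2, h3, h4]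
      simp [pvFindA, pvAltCore, pvPairs, List.isPrefixOf_iff_prefix, List.cons_prefix_cons, PySem.Chars.startswith_iff, pvTake1, List.idxOf?, List.findIdx?, List.findIdx?.go, h_b, h_p, h_m, h_f, h_d, h_t, h_n, h_l, h_g, h_k, h_h, h_j, h_q, h_x, h_z, h_c, h_s, h_r, h_a, h_o, h_e, h1, h2, h3, h4]
    by_cases h_w : 'w' = c
    · subst h_w
      simp [pvFindA, pvAltCore, pvPairs, List.isPrefixOf_iff_prefix, List.cons_prefix_cons, PySem.Chars.startswith_iff, pvTake1, List.idxOf?, List.findIdx?, List.findIdx?.go, h_b, h_p, h_m, h_f, h_d, h_t, h_n, h_l, h_g, h_k, h_h, h_j, h_q, h_x, h_z, h_c, h_s, h_r, h_a, h_o, h_e, h_y]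
    simp [pvFindA, pvAltCore, pvPairs, List.isPrefixOf_iff_prefix, List.cons_prefix_cons, PySem.Chars.startswith_iff, pvTake1, List.idxOf?, List.findIdx?, List.findIdx?.go, h_b, h_p, h_m, h_f, h_d, h_t, h_n, h_l, h_g, h_k, h_h, h_j, h_q, h_x, h_z, h_c, h_s, h_r, h_a, h_o, h_e, h_y, h_w, Ne.symm h_b, Ne.symm h_p, Ne.symm h_m, Ne.symm h_f, Ne.symm h_d, Ne.symm h_t, Ne.symm h_n, Ne.symm h_l, Ne.symm h_g, Ne.symm h_k, Ne.symm h_h, Ne.symm h_j, Ne.symm h_q, Ne.symm h_x, Ne.symm h_z, Ne.symm h_c, Ne.symm h_s, Ne.symm h_r, Ne.symm h_a, Ne.symm h_o, Ne.symm h_e, Ne.symm h_y, Ne.symm h_w]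

-- ===== VERDICT (by name: the statement is the Claim_ definition above) =====
theorem get_mand_initial_coding_spec : Claim_equal_get_mand_initial_coding := by
  intro s _
  unfold Spec_get_mand_initial_coding
  rw [bridgeA, bridgeB]
  exact pvMain _
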